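-- pv_equiv track=rewrite | github.com/DigiBugCat/fmp-mcp | tools/workflows.py | _match_theses
-- ===== SOURCE A (Python) =====
-- from typing import TYPE_CHECKING, Any
--
-- THESIS_MAP: dict[str, dict[str, Any]] = {
--     "trained_on_it": {
--         "tickers": ["DDOG", "NET", "ESTC", "MDB", "TWLO", "CRWD", "SNOW", "CFLT", "GTLB", "HCP"],
--         "label": '"Trained On It" Moat (§3)',
--         "key_question": "Does AI/agentic adoption show up in usage metrics?",
--     },
--     "bifurcation_infra": {
--         "tickers": ["DDOG", "NET", "CRWD", "ESTC", "MDB", "CFLT", "SNOW", "ZS", "PANW", "CYBR"],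
--         "label": "Software Bifurcation — Infrastructure (§2)",
--         "key_question": "Is usage-based revenue accelerating while seat-based peers decelerate?",
--     },
--     "bifurcation_prod": {
--         "tickers": ["CRM", "WDAY", "ADBE", "TEAM", "PATH"],
--         "label": "Software Bifurcation — Productivity [SHORT SIDE] (§2)",
--         "key_question": "Is seat-based compression showing up in NRR or guidance?",
--     },
--     "ai_infra": {
--         "tickers": [
--             "NVDA", "AMD", "AVGO", "MRVL", "MU", "ALAB", "CRDO", "ASML", "TSM",
--             "VRT", "ETN", "BE", "PWR", "GEV", "FCX", "SCCO", "DELL", "SMCI", "HPE",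
--         ],
--         "label": "AI Infrastructure Bottleneck (§1)",
--         "key_question": "Are supply constraints / pricing power holding?",
--     },
--     "spender": {
--         "tickers": ["MSFT", "META", "GOOG", "GOOGL", "AMZN", "AAPL"],
--         "label": "Spenders vs Suppliers — Spender Side (§5)",
--         "key_question": "Does capex guidance increase again? Any AI ROI proof?",
--     },
--     "agentic": {
--         "tickers": ["DDOG", "NET", "CRWD", "ESTC", "MDB", "TWLO", "SNOW"],
--         "label": "Agentic AI Tailwind (§7)",
--         "key_question": "Any explicit commentary on agent-driven usage growth?",
--     },
-- }
--
-- def _match_theses(ticker: str) -> list[dict]: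
--     matches = []
--     for thesis in THESIS_MAP.values():
--         if ticker in thesis["tickers"]:
--             matches.append({
--                 "thesis": thesis["label"],
--                 "key_question": thesis["key_question"],
--             })
--     return matches
-- ===== SOURCE B (Python) =====
-- # Precomputed reverse index: the fixed THESIS_MAP is flattened once, by hand,
-- # into a theses table plus a ticker -> thesis-indices lookup, so a call is a
-- # single dict lookup instead of a scan over all theses.
--
-- THESES: list[tuple[str, str]] = [  # (label, key_question), in THESIS_MAP order
--     ('"Trained On It" Moat (§3)', "Does AI/agentic adoption show up in usage metrics?"),
--     ("Software Bifurcation — Infrastructure (§2)", "Is usage-based revenue accelerating while seat-based peers decelerate?"),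
--     ("Software Bifurcation — Productivity [SHORT SIDE] (§2)", "Is seat-based compression showing up in NRR or guidance?"),
--     ("AI Infrastructure Bottleneck (§1)", "Are supply constraints / pricing power holding?"),
--     ("Spenders vs Suppliers — Spender Side (§5)", "Does capex guidance increase again? Any AI ROI proof?"),
--     ("Agentic AI Tailwind (§7)", "Any explicit commentary on agent-driven usage growth?"),
-- ]
--
-- TICKER_INDEX: dict[str, tuple[int, ...]] = {
--     "DDOG": (0, 1, 5), "NET": (0, 1, 5), "ESTC": (0, 1, 5), "MDB": (0, 1, 5),
--     "TWLO": (0, 5), "CRWD": (0, 1, 5), "SNOW": (0, 1, 5), "CFLT": (0, 1),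
--     "GTLB": (0,), "HCP": (0,), "ZS": (1,), "PANW": (1,), "CYBR": (1,),
--     "CRM": (2,), "WDAY": (2,), "ADBE": (2,), "TEAM": (2,), "PATH": (2,),
--     "NVDA": (3,), "AMD": (3,), "AVGO": (3,), "MRVL": (3,), "MU": (3,),
--     "ALAB": (3,), "CRDO": (3,), "ASML": (3,), "TSM": (3,), "VRT": (3,),
--     "ETN": (3,), "BE": (3,), "PWR": (3,), "GEV": (3,), "FCX": (3,),
--     "SCCO": (3,), "DELL": (3,), "SMCI": (3,), "HPE": (3,),
--     "MSFT": (4,), "META": (4,), "GOOG": (4,), "GOOGL": (4,), "AMZN": (4,),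
--     "AAPL": (4,),
-- }
--
--
-- def _match_theses(ticker: str) -> list[dict]:
--     return [
--         {"thesis": THESES[i][0], "key_question": THESES[i][1]}
--         for i in TICKER_INDEX.get(ticker, ())
--     ]
-- ===== Notes on version B (the rewrite author's own statement) =====
-- stated objective: alternative
-- what changed: Replaced the per-call scan over THESIS_MAP (membership test in each thesis's ticker list) with a hand-precomputed reverse index ticker -> thesis indices plus a flat theses table, so each call is one dict lookup and a small list build.
import Mathlib
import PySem

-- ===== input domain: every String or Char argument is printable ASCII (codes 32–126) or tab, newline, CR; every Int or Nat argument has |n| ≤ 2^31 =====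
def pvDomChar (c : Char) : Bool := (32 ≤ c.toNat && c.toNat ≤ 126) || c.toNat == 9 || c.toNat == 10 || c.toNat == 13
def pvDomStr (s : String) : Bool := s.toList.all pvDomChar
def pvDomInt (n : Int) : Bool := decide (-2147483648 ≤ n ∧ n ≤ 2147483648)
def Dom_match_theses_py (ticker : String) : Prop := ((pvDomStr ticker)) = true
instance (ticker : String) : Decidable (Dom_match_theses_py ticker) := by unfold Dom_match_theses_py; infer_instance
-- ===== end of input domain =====

-- B replaces A's per-call scan of THESIS_MAP with a hand-precomputed reverse index
-- (ticker → thesis indices) plus a flat theses table (objective: alternative).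

-- ===== PORT A =====
-- THESIS_MAP's values, in insertion order: (tickers, label, key_question).
def pvThesisMapValues : List (List String × String × String) :=
  [ (["DDOG", "NET", "ESTC", "MDB", "TWLO", "CRWD", "SNOW", "CFLT", "GTLB", "HCP"],
     "\"Trained On It\" Moat (§3)",
     "Does AI/agentic adoption show up in usage metrics?"),
    (["DDOG", "NET", "CRWD", "ESTC", "MDB", "CFLT", "SNOW", "ZS", "PANW", "CYBR"],
     "Software Bifurcation — Infrastructure (§2)",
     "Is usage-based revenue accelerating while seat-based peers decelerate?"),
    (["CRM", "WDAY", "ADBE", "TEAM", "PATH"],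
     "Software Bifurcation — Productivity [SHORT SIDE] (§2)",
     "Is seat-based compression showing up in NRR or guidance?"),
    (["NVDA", "AMD", "AVGO", "MRVL", "MU", "ALAB", "CRDO", "ASML", "TSM",
      "VRT", "ETN", "BE", "PWR", "GEV", "FCX", "SCCO", "DELL", "SMCI", "HPE"],
     "AI Infrastructure Bottleneck (§1)",
     "Are supply constraints / pricing power holding?"),
    (["MSFT", "META", "GOOG", "GOOGL", "AMZN", "AAPL"],
     "Spenders vs Suppliers — Spender Side (§5)",
     "Does capex guidance increase again? Any AI ROI proof?"),
    (["DDOG", "NET", "CRWD", "ESTC", "MDB", "TWLO", "SNOW"],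
     "Agentic AI Tailwind (§7)",
     "Any explicit commentary on agent-driven usage growth?") ]

def match_theses_py (ticker : String) : List (List (String × String)) :=
  pvThesisMapValues.foldl (fun ms thesis =>
    if thesis.1.contains ticker then
      ms ++ [[("thesis", thesis.2.1), ("key_question", thesis.2.2)]]
    else ms) []

-- ===== PORT B =====
-- THESES of Source B: (label, key_question) per thesis, in THESIS_MAP order.
def pvTheses : List (String × String) :=
  [ ("\"Trained On It\" Moat (§3)", "Does AI/agentic adoption show up in usage metrics?"),
    ("Software Bifurcation — Infrastructure (§2)", "Is usage-based revenue accelerating while seat-based peers decelerate?"),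
    ("Software Bifurcation — Productivity [SHORT SIDE] (§2)", "Is seat-based compression showing up in NRR or guidance?"),
    ("AI Infrastructure Bottleneck (§1)", "Are supply constraints / pricing power holding?"),
    ("Spenders vs Suppliers — Spender Side (§5)", "Does capex guidance increase again? Any AI ROI proof?"),
    ("Agentic AI Tailwind (§7)", "Any explicit commentary on agent-driven usage growth?") ]

-- TICKER_INDEX.get(ticker, ()) on Source B's literal dict, rendered as a lookup table.
def pvTickerIndex (t : String) : List Nat :=
  match t with
  | "DDOG" => [0, 1, 5] | "NET" => [0, 1, 5] | "ESTC" => [0, 1, 5] | "MDB" => [0, 1, 5]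
  | "TWLO" => [0, 5] | "CRWD" => [0, 1, 5] | "SNOW" => [0, 1, 5] | "CFLT" => [0, 1]
  | "GTLB" => [0] | "HCP" => [0] | "ZS" => [1] | "PANW" => [1] | "CYBR" => [1]
  | "CRM" => [2] | "WDAY" => [2] | "ADBE" => [2] | "TEAM" => [2] | "PATH" => [2]
  | "NVDA" => [3] | "AMD" => [3] | "AVGO" => [3] | "MRVL" => [3] | "MU" => [3]
  | "ALAB" => [3] | "CRDO" => [3] | "ASML" => [3] | "TSM" => [3] | "VRT" => [3]
  | "ETN" => [3] | "BE" => [3] | "PWR" => [3] | "GEV" => [3] | "FCX" => [3]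
  | "SCCO" => [3] | "DELL" => [3] | "SMCI" => [3] | "HPE" => [3]
  | "MSFT" => [4] | "META" => [4] | "GOOG" => [4] | "GOOGL" => [4] | "AMZN" => [4]
  | "AAPL" => [4]
  | _ => []

def match_theses_py_alt (ticker : String) : List (List (String × String)) :=
  (pvTickerIndex ticker).map (fun i =>
    [("thesis", (pvTheses.getD i ("", "")).1), ("key_question", (pvTheses.getD i ("", "")).2)])

-- ===== PRECONDITION & SPEC =====
def Spec_match_theses_py (ticker : String) (out : List (List (String × String))) : Prop := out = match_theses_py_alt ticker
instance (ticker : String) (out : List (List (String × String))) : Decidable (Spec_match_theses_py ticker out) := by unfold Spec_match_theses_py; infer_instance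

-- ===== CLAIM (what is proved, stated in full; the proofs are below) =====
def Claim_equal_match_theses_py : Prop := ∀ (ticker : String), Dom_match_theses_py ticker → Spec_match_theses_py ticker (match_theses_py ticker)

-- ===== LEMMAS AND PROOFS =====
-- all tickers occurring in THESIS_MAP / TICKER_INDEX
def pvAll : List String := ["DDOG", "NET", "ESTC", "MDB", "TWLO", "CRWD", "SNOW", "CFLT", "GTLB", "HCP", "ZS", "PANW", "CYBR", "CRM", "WDAY", "ADBE", "TEAM", "PATH", "NVDA", "AMD", "AVGO", "MRVL", "MU", "ALAB", "CRDO", "ASML", "TSM", "VRT", "ETN", "BE", "PWR", "GEV", "FCX", "SCCO", "DELL", "SMCI", "HPE", "MSFT", "META", "GOOG", "GOOGL", "AMZN", "AAPL"]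

set_option maxRecDepth 8000 in
set_option maxHeartbeats 1600000 in
theorem key_eq (t : String) : match_theses_py t = match_theses_py_alt t := by
  by_cases h : t ∈ pvAll
  · -- known tickers: one kernel evaluation over all of pvAll
    have hall : pvAll.all (fun x => decide (match_theses_py x = match_theses_py_alt x)) = true := by decide
    exact of_decide_eq_true (List.all_eq_true.mp hall t h)
  · -- unknown ticker: every membership test fails and the index lookup misses
    have hidx : pvTickerIndex t = [] := by
      unfold pvTickerIndex
      split <;> (try rfl) <;> (exfalso; apply h; decide)
    have hc : ∀ l : List String, (∀ x ∈ l, x ∈ pvAll) → l.contains t = false := by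
      intro l hl
      have : t ∉ l := fun hm => h (hl t hm)
      simpa using this
    simp only [match_theses_py, pvThesisMapValues, List.foldl,
      hc ["DDOG", "NET", "ESTC", "MDB", "TWLO", "CRWD", "SNOW", "CFLT", "GTLB", "HCP"] (by decide),
      hc ["DDOG", "NET", "CRWD", "ESTC", "MDB", "CFLT", "SNOW", "ZS", "PANW", "CYBR"] (by decide),
      hc ["CRM", "WDAY", "ADBE", "TEAM", "PATH"] (by decide),
      hc ["NVDA", "AMD", "AVGO", "MRVL", "MU", "ALAB", "CRDO", "ASML", "TSM", "VRT", "ETN", "BE", "PWR", "GEV", "FCX", "SCCO", "DELL", "SMCI", "HPE"] (by decide),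
      hc ["MSFT", "META", "GOOG", "GOOGL", "AMZN", "AAPL"] (by decide),
      hc ["DDOG", "NET", "CRWD", "ESTC", "MDB", "TWLO", "SNOW"] (by decide),
      Bool.false_eq_true, if_false]
    simp [match_theses_py_alt, hidx]

-- ===== VERDICT (by name: the statement is the Claim_ definition above) =====
theorem match_theses_py_spec : Claim_equal_match_theses_py := by
  intro t _
  exact key_eq t
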